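-- pv_equiv track=rewrite | github.com/KaedeTai/pondr | pondr/research/synthesizer.py | _select_important_results
-- ===== SOURCE A (Python) =====
-- def _select_important_results(results: list[dict], max_n: int = 5) -> list[dict]:
--     """Pick at most max_n sub-task results, prioritising those with the longest
--     non-error answers (a rough proxy for 'most informative')."""
--     scored: list[tuple[int, dict]] = []
--     for r in results or []:
--         ans = (r.get("answer") or "")
--         # Drop obvious failures
--         if not ans or ans.startswith("error:") or ans == "(round cap)":
--             score = 0
--         else:
--             score = len(ans)
--         scored.append((score, r))
--     # Most informative first; stable for equal scores so original ordering wins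
--     scored.sort(key=lambda t: t[0], reverse=True)
--     return [r for _, r in scored[:max_n]]
-- ===== SOURCE B (Python) =====
-- def _select_important_results(results: list[dict], max_n: int = 5) -> list[dict]:
--     """Selection-based top-k: repeatedly extract the highest-scoring remaining
--     result (the earliest one on ties), once per slot the [:max_n] slice admits."""
--     def _score(r):
--         ans = r.get("answer") or ""
--         if not ans or ans.startswith("error:") or ans == "(round cap)":
--             return 0
--         return len(ans)
--     remaining = [(_score(r), r) for r in (results or [])]
--     out = []
--     for _ in remaining[:max_n]:
--         best = 0
--         for j in range(1, len(remaining)):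
--             if remaining[j][0] > remaining[best][0]:
--                 best = j
--         out.append(remaining.pop(best)[1])
--     return out
-- ===== Notes on version B (the rewrite author's own statement) =====
-- stated objective: alternative
-- what changed: Replaces A's full stable reverse sort of score-decorated pairs followed by a slice with an in-place selection procedure: it determines how many slots the [:max_n] slice admits and then repeatedly scans the remaining pool, pops the earliest highest-scoring entry and appends it to the output, never sorting the whole list.
import Mathlib
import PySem

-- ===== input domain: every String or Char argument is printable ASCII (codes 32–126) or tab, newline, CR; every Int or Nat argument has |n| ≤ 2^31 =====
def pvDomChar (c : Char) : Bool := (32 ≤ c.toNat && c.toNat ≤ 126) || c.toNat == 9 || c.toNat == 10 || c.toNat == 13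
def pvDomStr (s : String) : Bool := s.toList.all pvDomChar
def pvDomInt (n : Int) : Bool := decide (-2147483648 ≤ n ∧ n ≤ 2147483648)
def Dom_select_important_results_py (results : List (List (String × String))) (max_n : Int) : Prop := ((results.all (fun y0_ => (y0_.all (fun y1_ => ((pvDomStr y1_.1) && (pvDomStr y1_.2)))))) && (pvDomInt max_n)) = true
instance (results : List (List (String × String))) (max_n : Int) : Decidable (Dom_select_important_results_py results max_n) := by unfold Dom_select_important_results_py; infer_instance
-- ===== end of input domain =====

-- B replaces A's full stable reverse sort + slice by a selection procedure that repeatedly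
-- pops the earliest highest-scoring remaining result, once per slot the [:max_n] slice admits.

-- ===== PORT A =====
-- per-result score: 0 for empty / "error:..." / "(round cap)" answers, else len(answer);
-- `(r.get("answer") or "")` = getD with default "" (a missing key gives "", and "" or "" is "")
def pvAnsScoreA (r : List (String × String)) : Int :=
  let ans : String := PySem.Dict.getD ⟨r⟩ "answer" ""
  if ans = "" || PySem.Str.startswith ans "error:" || ans = "(round cap)" then 0
  else PySem.Str.len ans

def select_important_results_py (results : List (List (String × String))) (max_n : Int) : List (List (String × String)) :=
  let scored : List (Int × List (String × String)) :=
    results.foldl (fun scored r => scored ++ [(pvAnsScoreA r, r)]) []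
  let sorted := PySem.List.sorted scored (fun t => t.1) true
  (PySem.List.slice sorted none (some max_n)).map (fun t => t.2)

-- ===== PORT B =====
-- the same per-result score (B's local helper _score)
def pvAnsScoreB (r : List (String × String)) : Int :=
  let ans : String := PySem.Dict.getD ⟨r⟩ "answer" ""
  if ans = "" || PySem.Str.startswith ans "error:" || ans = "(round cap)" then 0
  else PySem.Str.len ans

-- B's inner loop: `best = 0; for j in range(1, len(remaining)): if remaining[j][0] > remaining[best][0]: best = j`
-- (the in-range indexings remaining[j] / remaining[best] are pyGetD with an arbitrary default)
def pvArgmax (rem : List (Int × List (String × String))) : Int :=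
  (PySem.List.pyRange 1 (rem.length : Int) 1).foldl
    (fun best j =>
      if (PySem.List.pyGetD rem j (0, [])).1 > (PySem.List.pyGetD rem best (0, [])).1
      then j else best) 0

-- B's outer loop: one iteration per element of remaining[:max_n]; `out.append(remaining.pop(best)[1])`
-- (pop? never returns none here since the iteration count is at most len(remaining))
def pvSelLoop (fuel : Nat) (rem : List (Int × List (String × String)))
    (out : List (List (String × String))) : List (List (String × String)) :=
  match fuel with
  | 0 => out
  | k + 1 =>
    match PySem.List.pop? rem (pvArgmax rem) with
    | none => out
    | some (p, rem') => pvSelLoop k rem' (out ++ [p.2])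

def select_important_results_py_alt (results : List (List (String × String))) (max_n : Int) : List (List (String × String)) :=
  let remaining : List (Int × List (String × String)) :=
    results.map (fun r => (pvAnsScoreB r, r))
  pvSelLoop (PySem.List.slice remaining none (some max_n)).length remaining []

-- ===== PRECONDITION & SPEC =====
def Spec_select_important_results_py (results : List (List (String × String))) (max_n : Int) (out : List (List (String × String))) : Prop := out = select_important_results_py_alt results max_n
instance (results : List (List (String × String))) (max_n : Int) (out : List (List (String × String))) : Decidable (Spec_select_important_results_py results max_n out) := by unfold Spec_select_important_results_py; infer_instance

-- ===== CLAIM (what is proved, stated in full; the proofs are below) =====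
def Claim_equal_select_important_results_py : Prop := ∀ (results : List (List (String × String))) (max_n : Int), Dom_select_important_results_py results max_n → Spec_select_important_results_py results max_n (select_important_results_py results max_n)

-- ===== LEMMAS AND PROOFS =====

theorem pv_insertBy_all_before {α : Type} (before : α → α → Bool) (x : α) (ys : List α)
    (h : ∀ y ∈ ys, before x y = true) :
    PySem.List.insertBy before x ys = x :: ys := by
  cases ys with
  | nil => simp [PySem.List.insertBy]
  | cons y ys => simp [PySem.List.insertBy, h y (by simp)]

theorem pv_slice_to_clamp {α : Type} (xs : List α) (b : Int) :
    PySem.List.slice xs none (some b) = xs.take (PySem.List.clampIdx xs.length b) := by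
  simp [PySem.List.slice]

-- stable descending sort by the first component pulls the FIRST maximal element to the front
theorem pv_sorted_head {α : Type} (xs : List (Int × α)) (i : Nat) (hi : i < xs.length)
    (hmax : ∀ j (hj : j < xs.length), (xs[j]'hj).1 ≤ (xs[i]'hi).1)
    (hfirst : ∀ j (hj : j < i), (xs[j]'(by omega)).1 < (xs[i]'hi).1) :
    PySem.List.sorted xs (fun t => t.1) true
      = (xs[i]'hi) :: PySem.List.sorted (xs.eraseIdx i) (fun t => t.1) true := by
  induction xs using List.reverseRecOn generalizing i with
  | nil => simp at hi
  | append_singleton xs x ih =>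
      rw [PySem.List.sorted_rev_eq_foldl_insertBy (xs ++ [x]), List.foldl_append,
        ← PySem.List.sorted_rev_eq_foldl_insertBy]
      simp only [List.foldl_cons, List.foldl_nil]
      rcases Nat.lt_or_ge i xs.length with hlt | hge
      · -- the first maximum is inside xs: x slots in behind it
        have hgx : ((xs ++ [x])[i]'hi) = (xs[i]'hlt) := List.getElem_append_left hlt
        have hmax' : ∀ j (hj : j < xs.length), (xs[j]'hj).1 ≤ (xs[i]'hlt).1 := by
          intro j hj
          have := hmax j (by simp; omega)
          rwa [List.getElem_append_left hj, hgx] at this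
        have hfirst' : ∀ j (hj : j < i), (xs[j]'(by omega)).1 < (xs[i]'hlt).1 := by
          intro j hj
          have := hfirst j hj
          rwa [List.getElem_append_left (by omega), hgx] at this
        have hxle : x.1 ≤ (xs[i]'hlt).1 := by
          have := hmax xs.length (by simp)
          rw [hgx] at this
          simpa using this
        rw [ih i hlt hmax' hfirst']
        have hstep : PySem.List.insertBy (fun a b => decide (b.1 < a.1)) x
            ((xs[i]'hlt) :: PySem.List.sorted (xs.eraseIdx i) (fun t => t.1) true)
            = (xs[i]'hlt) :: PySem.List.insertBy (fun a b => decide (b.1 < a.1)) x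
                (PySem.List.sorted (xs.eraseIdx i) (fun t => t.1) true) := by
          simp only [PySem.List.insertBy]
          rw [if_neg (by simp; omega)]
        rw [hstep, hgx, List.eraseIdx_append_of_lt_length hlt]
        congr 1
        rw [PySem.List.sorted_rev_eq_foldl_insertBy (xs.eraseIdx i ++ [x]), List.foldl_append,
          ← PySem.List.sorted_rev_eq_foldl_insertBy]
        simp
      · -- the first maximum is x itself: it is strictly larger than everything in xs
        have hieq : i = xs.length := by
          have := hi; simp at this; omega
        subst hieq
        have hgx : ((xs ++ [x])[xs.length]'hi) = x := by
          rw [List.getElem_append_right (by omega)]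
          simp
        have hall : ∀ y ∈ PySem.List.sorted xs (fun t => t.1) true, y.1 < x.1 := by
          intro y hy
          have hyx : y ∈ xs := by rwa [PySem.List.mem_sorted] at hy
          rcases List.mem_iff_getElem.mp hyx with ⟨j, hj, rfl⟩
          have := hfirst j hj
          rwa [List.getElem_append_left hj, hgx] at this
        rw [pv_insertBy_all_before _ _ _ (by intro y hy; simpa using hall y hy), hgx,
          List.eraseIdx_append_of_length_le (le_refl _)]
        simp

-- B's inner scan returns the index of the first maximal score among rem
theorem pv_argmax_spec {rem : List (Int × List (String × String))} (hne : rem ≠ []) :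
    ∃ i : Nat, pvArgmax rem = (i : Int) ∧ ∃ hi : i < rem.length,
      (∀ j (hj : j < rem.length), (rem[j]'hj).1 ≤ (rem[i]'hi).1) ∧
      (∀ j (hj : j < i), (rem[j]'(by omega)).1 < (rem[i]'hi).1) := by
  have hlen : 1 ≤ rem.length := by
    cases rem with | nil => simp at hne | cons a l => simp
  -- invariant over the prefix range(1, m)
  have main : ∀ m : Nat, ∀ _h1 : 1 ≤ m, ∀ _hm : m ≤ rem.length,
      ∃ i : Nat, (PySem.List.pyRange 1 (m : Int) 1).foldl
          (fun best j =>
            if (PySem.List.pyGetD rem j (0, [])).1 > (PySem.List.pyGetD rem best (0, [])).1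
            then j else best) 0 = (i : Int) ∧ ∃ hi : i < m,
        (∀ j (hj : j < m), (rem[j]'(by omega)).1 ≤ (rem[i]'(by omega)).1) ∧
        (∀ j (hj : j < i), (rem[j]'(by omega)).1 < (rem[i]'(by omega)).1) := by
    intro m
    induction m with
    | zero => intro h1 _; omega
    | succ m ihm =>
        intro h1 hm
        rcases Nat.lt_or_ge m 1 with hm1 | hm1
        · -- m = 0 : range(1,1) is empty, best = 0
          have : m = 0 := by omega
          subst this
          refine ⟨0, ?_, by omega, ?_, by omega⟩
          · rw [show ((1 : Nat) : Int) = (1 : Int) by norm_num,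
              PySem.List.pyRange_one_eq_nil (by norm_num)]
            simp
          · intro j hj; interval_cases j; omega
        · obtain ⟨i, heq, hi, hmax, hfirst⟩ := ihm hm1 (by omega)
          have hrange : PySem.List.pyRange 1 ((m + 1 : Nat) : Int) 1
              = PySem.List.pyRange 1 (m : Int) 1 ++ [(m : Int)] := by
            rw [show ((m + 1 : Nat) : Int) = (m : Int) + 1 by push_cast; ring]
            exact PySem.List.pyRange_one_succ_right (by exact_mod_cast hm1)
          rw [hrange, List.foldl_append]
          simp only [List.foldl_cons, List.foldl_nil]
          rw [heq]
          have hmlt : (m : Int) < rem.length := by exact_mod_cast (by omega : m < rem.length)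
          have hilt : (i : Int) < rem.length := by exact_mod_cast (by omega : i < rem.length)
          rw [PySem.List.pyGetD_eq_getElem rem _ (by positivity) hmlt,
            PySem.List.pyGetD_eq_getElem rem _ (by positivity) hilt]
          simp only [Int.toNat_natCast]
          split_ifs with hcmp
          · refine ⟨m, rfl, by omega, ?_, ?_⟩
            · intro j hj
              rcases Nat.lt_or_ge j m with hjm | hjm
              · have := hmax j hjm; omega
              · have : j = m := by omega
                subst this; omega
            · intro j hj
              have := hmax j (by omega); omega
          · refine ⟨i, rfl, by omega, ?_, hfirst⟩
            intro j hj
            rcases Nat.lt_or_ge j m with hjm | hjm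
            · exact hmax j hjm
            · have : j = m := by omega
              subst this; omega
  obtain ⟨i, heq, hi, hmax, hfirst⟩ := main rem.length hlen (le_refl _)
  exact ⟨i, heq, by omega, hmax, hfirst⟩

-- B's outer loop = take fuel of the stable descending sort (appended to the accumulator)
theorem pv_selLoop_eq (k : Nat) :
    ∀ (rem : List (Int × List (String × String))) (acc : List (List (String × String))),
      k ≤ rem.length →
      pvSelLoop k rem acc
        = acc ++ ((PySem.List.sorted rem (fun t => t.1) true).take k).map (fun t => t.2) := by
  induction k with
  | zero => intro rem acc _; simp [pvSelLoop]
  | succ k ih =>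
      intro rem acc hk
      have hne : rem ≠ [] := by
        intro h; subst h; simp at hk
      obtain ⟨i, heq, hi, hmax, hfirst⟩ := pv_argmax_spec hne
      have hpop : PySem.List.pop? rem (pvArgmax rem) = some (rem[i]'hi, rem.eraseIdx i) := by
        rw [heq]; exact PySem.List.pop?_natCast rem i hi
      rw [pvSelLoop, hpop]
      show pvSelLoop k (rem.eraseIdx i) (acc ++ [(rem[i]'hi).2])
          = acc ++ List.map (fun t => t.2) (List.take (k + 1) (PySem.List.sorted rem (fun t => t.1) true))
      rw [ih (rem.eraseIdx i) _ (by rw [List.length_eraseIdx_of_lt hi]; omega),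
        pv_sorted_head rem i hi hmax hfirst]
      simp

theorem pv_final (results : List (List (String × String))) (max_n : Int) :
    select_important_results_py results max_n = select_important_results_py_alt results max_n := by
  simp only [select_important_results_py, select_important_results_py_alt]
  have hscore : pvAnsScoreB = pvAnsScoreA := rfl
  rw [hscore]
  have hscored : List.foldl (fun scored r => scored ++ [(pvAnsScoreA r, r)]) [] results
      = results.map (fun r => (pvAnsScoreA r, r)) := by
    simpa using PySem.List.foldl_append_singleton_eq_map (fun r => (pvAnsScoreA r, r)) results []
  rw [hscored]
  set scored := results.map (fun r => (pvAnsScoreA r, r)) with hs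
  have hfuel : (PySem.List.slice scored none (some max_n)).length
      = PySem.List.clampIdx scored.length max_n := by
    rw [pv_slice_to_clamp, List.length_take]
    exact min_eq_left (PySem.List.clampIdx_le _ _)
  rw [hfuel, pv_selLoop_eq _ _ _ (PySem.List.clampIdx_le _ _), pv_slice_to_clamp,
    List.map_take]
  have hlensort : (PySem.List.sorted scored (fun t => t.1) true).length = scored.length :=
    PySem.List.length_sorted _ _ _
  rw [← hlensort]
  simp

-- ===== VERDICT (by name: the statement is the Claim_ definition above) =====
theorem select_important_results_py_spec : Claim_equal_select_important_results_py := by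
  intro results max_n _
  unfold Spec_select_important_results_py
  exact pv_final results max_n
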